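-- pv_equiv track=rewrite | github.com/Vaibhav14k/DSA_Question | Leetcode-Pattern-problems-main/Leetcode-Pattern-problems-main/DP/375_guess_the_number_higher_or_lower_II.py | solve
-- ===== SOURCE A (Python) =====
-- def solve(n):
--     dp = [[0 for _ in range(n+2)] for _ in range(n+2)]
--     for start in range(n,0,-1):
--         for end in range(start,n+1):
--             if start==end:
--                 continue
--             ans = float("inf")
--             for k in range(start,end+1):
--                 ans = min(ans,k+ max(dp[start][k-1],dp[k+1][end]))
--             dp[start][end] = ans
--     return dp[1][n]
-- ===== SOURCE B (Python) =====
-- def solve(n):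
--     memo = {}
--     stack = [(1, n)]
--     while stack:
--         s, e = stack.pop()
--         if e <= s or (s, e) in memo:
--             continue
--         deps = [(s, k - 1) for k in range(s, e + 1)] + [(k + 1, e) for k in range(s, e + 1)]
--         pending = [p for p in deps if p[0] < p[1] and p not in memo]
--         if pending:
--             stack.append((s, e))
--             stack.extend(pending)
--         else:
--             memo[(s, e)] = min(k + max(memo.get((s, k - 1), 0), memo.get((k + 1, e), 0))
--                                for k in range(s, e + 1))
--     return memo.get((1, n), 0)
-- ===== Notes on version B (the rewrite author's own statement) =====
-- stated objective: alternative
-- what changed: B replaces A's bottom-up fill of an (n+2)x(n+2) matrix by three nested static loops with a demand-driven worklist: an explicit stack of intervals is popped, an interval pushes its not-yet-memoized sub-intervals and retries, and a memo dict records each interval's value the first time all its dependencies are ready.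
import Mathlib
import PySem

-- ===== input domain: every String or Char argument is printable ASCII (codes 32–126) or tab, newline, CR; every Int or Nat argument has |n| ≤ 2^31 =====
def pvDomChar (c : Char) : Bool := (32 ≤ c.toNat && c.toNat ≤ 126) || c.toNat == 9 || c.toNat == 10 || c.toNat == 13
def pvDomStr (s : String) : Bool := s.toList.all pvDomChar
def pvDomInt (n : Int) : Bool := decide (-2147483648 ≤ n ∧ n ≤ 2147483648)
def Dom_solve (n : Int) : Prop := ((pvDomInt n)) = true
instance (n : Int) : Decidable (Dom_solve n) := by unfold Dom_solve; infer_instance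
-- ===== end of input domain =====

-- B replaces A's bottom-up triple-loop matrix fill by a demand-driven explicit-stack
-- worklist with a memo dict; same result, different algorithmic structure (alternative).

-- ===== PORT A =====
-- dp[i][j] (indices are in range whenever Python reads/writes them under Pre_solve)
def get2 (dp : List (List Int)) (i j : Int) : Int :=
  PySem.List.pyGetD (PySem.List.pyGetD dp i []) j 0

-- dp[i][j] = v (row is fetched, updated in place)
def set2 (dp : List (List Int)) (i j : Int) (v : Int) : List (List Int) :=
  PySem.List.pySetD dp i (PySem.List.pySetD (PySem.List.pyGetD dp i []) j v)

-- ans = float("inf"); ans = min(ans, v)  — none plays inf (the k-loop is never empty when run)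
def minO (a : Option Int) (v : Int) : Option Int :=
  some (match a with | none => v | some x => min x v)

def solve (n : Int) : Int :=
  let dp : List (List Int) :=
    (PySem.List.pyRange 0 (n+2) 1).map (fun _ =>
      (PySem.List.pyRange 0 (n+2) 1).map (fun _ => (0 : Int)))
  let dp :=
    (PySem.List.pyRange n 0 (-1)).foldl (fun dp start =>
      (PySem.List.pyRange start (n+1) 1).foldl (fun dp e =>
        if start = e then dp
        else
          let ans :=
            (PySem.List.pyRange start (e+1) 1).foldl (fun a k =>
              minO a (k + max (get2 dp start (k-1)) (get2 dp (k+1) e))) none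
          set2 dp start e (ans.getD 0)) dp) dp
  get2 dp 1 n

-- ===== PORT B =====
-- Source B's explicit-stack worklist: pop an interval; if unresolved, either push its missing
-- sub-intervals (then itself) or, when all dependencies are memoized, record its value.
-- The dict is only read via get/in and written via item assignment (never iterated), so
-- Std.HashMap is an exact port of it for this use. The Nat fuel only makes the while-loop
-- total (fuelB bounds the iteration count, proved below); it changes no computed value.

-- deps = [(s,k-1) for k in range(s,e+1)] + [(k+1,e) for k in range(s,e+1)]
def depsB (s e : Int) : List (Int × Int) :=
  (PySem.List.pyRange s (e+1) 1).map (fun k => (s, k - 1)) ++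
  (PySem.List.pyRange s (e+1) 1).map (fun k => (k + 1, e))

-- pending = [p for p in deps if p[0] < p[1] and p not in memo]
def pendB (m : Std.HashMap (Int × Int) Int) (s e : Int) : List (Int × Int) :=
  (depsB s e).filter (fun p => decide (p.1 < p.2) && !m.contains p)

-- min(k + max(memo.get((s,k-1),0), memo.get((k+1,e),0)) for k in range(s,e+1))
def bestB (m : Std.HashMap (Int × Int) Int) (s e : Int) : Int :=
  ((PySem.List.min?
      ((PySem.List.pyRange s (e+1) 1).map (fun k =>
        k + max (m.getD (s, k - 1) 0) (m.getD (k + 1, e) 0)))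
      (fun x => x)).getD 0)

-- the while-loop: head of the list = top of the Python stack
def runB : Nat → List (Int × Int) → Std.HashMap (Int × Int) Int → Std.HashMap (Int × Int) Int
  | 0, _, m => m
  | _ + 1, [], m => m
  | f + 1, (s, e) :: st, m =>
    if e ≤ s ∨ (s, e) ∈ m then runB f st m
    else if (pendB m s e).isEmpty then
      runB f st (m.insert (s, e) (bestB m s e))
    else
      runB f ((pendB m s e).reverse ++ (s, e) :: st) m

-- fuel sufficient to resolve an interval of length L (proved in runB_resolve)
def fuelB : Nat → Nat
  | 0 => 1
  | L + 1 => 2 + 2 * (L + 2) * fuelB L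

def solve_alt (n : Int) : Int :=
  (runB (fuelB (n - 1).toNat) [(1, n)] ∅).getD (1, n) 0

-- ===== PRECONDITION & SPEC =====
-- Pre_solve: A raises IndexError (dp[1] on a table of fewer than 2 rows) for n < 0.
def Pre_solve (n : Int) : Prop := 0 ≤ n
instance (n : Int) : Decidable (Pre_solve n) := by unfold Pre_solve; infer_instance
def pvWitness_solve : Int := 5

def Spec_solve (n : Int) (out : Int) : Prop := out = solve_alt n
instance (n : Int) (out : Int) : Decidable (Spec_solve n out) := by unfold Spec_solve; infer_instance

-- ===== CLAIM (what is proved, stated in full; the proofs are below) =====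
def Claim_equal_solve : Prop := ∀ (n : Int), Dom_solve n → Pre_solve n → Spec_solve n (solve n)

-- ===== LEMMAS AND PROOFS =====

-- the DP value: minimal worst-case cost to guess in [s,e], fueled by the interval length
def gF : Nat → Int → Int → Int
  | 0, _, _ => 0
  | f+1, s, e =>
    if e ≤ s then 0
    else
      ((PySem.List.min?
         ((PySem.List.pyRange s (e+1) 1).map (fun k =>
           k + max (gF f s (k-1)) (gF f (k+1) e)))
         (fun x => x)).getD 0)

def g (s e : Int) : Int := gF (e - s).toNat s e

lemma gF_succ_def (f : Nat) (s e : Int) :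
    gF (f+1) s e =
      if e ≤ s then 0
      else
        ((PySem.List.min?
           ((PySem.List.pyRange s (e+1) 1).map (fun k =>
             k + max (gF f s (k-1)) (gF f (k+1) e)))
           (fun x => x)).getD 0) := rfl

lemma gF_step (f : Nat) : ∀ s e : Int, (e - s).toNat ≤ f → gF (f+1) s e = gF f s e := by
  induction f with
  | zero =>
    intro s e h
    have : e ≤ s := by omega
    simp [gF, this]
  | succ f ih =>
    intro s e h
    rw [gF_succ_def (f+1) s e, gF_succ_def f s e]
    by_cases hes : e ≤ s
    · simp [hes]
    · simp only [hes, if_false]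
      congr 2
      apply List.map_congr_left
      intro k hk
      rw [PySem.List.mem_pyRange_one] at hk
      rw [ih s (k-1) (by omega), ih (k+1) e (by omega)]

lemma gF_eq_g (f : Nat) (s e : Int) (h : (e - s).toNat ≤ f) : gF f s e = g s e := by
  unfold g
  induction f with
  | zero => have h0 : (e - s).toNat = 0 := by omega
            rw [h0]
  | succ f ih =>
    by_cases h' : (e - s).toNat ≤ f
    · rw [gF_step f s e h', ih h']
    · have h1 : (e - s).toNat = f + 1 := by omega
      rw [h1]

lemma g_zero {s e : Int} (h : e ≤ s) : g s e = 0 := by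
  unfold g
  cases hn : (e - s).toNat with
  | zero => simp [gF]
  | succ f => simp [gF_succ_def, h]

lemma g_rec {s e : Int} (h : s < e) :
    g s e = ((PySem.List.min?
               ((PySem.List.pyRange s (e+1) 1).map (fun k =>
                 k + max (g s (k-1)) (g (k+1) e)))
               (fun x => x)).getD 0) := by
  have hn : (e - s).toNat = ((e - s).toNat - 1) + 1 := by omega
  conv_lhs => rw [g, hn]
  rw [gF_succ_def]
  rw [if_neg (by omega)]
  congr 2
  apply List.map_congr_left
  intro k hk
  rw [PySem.List.mem_pyRange_one] at hk
  rw [gF_eq_g _ s (k-1) (by omega), gF_eq_g _ (k+1) e (by omega)]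

-- ---------- side A ----------

-- A's running-min fold equals min? of the mapped candidate list
lemma foldl_minO_some (f : Int → Int) (l : List Int) :
    ∀ x : Int, l.foldl (fun a k => minO a (f k)) (some x) = some ((l.map f).foldl min x) := by
  induction l with
  | nil => intro x; simp
  | cons y t ih => intro x; simpa [minO] using ih (min x (f y))

lemma foldl_minO (f : Int → Int) (l : List Int) (hl : l ≠ []) :
    l.foldl (fun a k => minO a (f k)) none = PySem.List.min? (l.map f) (fun x => x) := by
  cases l with
  | nil => exact absurd rfl hl
  | cons y t =>
    simp only [List.foldl_cons, minO, List.map_cons]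
    rw [PySem.List.min?_id_cons]
    exact foldl_minO_some f t (f y)

-- shape of A's table
def Shape (n : Int) (dp : List (List Int)) : Prop :=
  dp.length = (n+2).toNat ∧ ∀ r ∈ dp, r.length = (n+2).toNat

lemma get2_eq (dp : List (List Int)) (i j : Int) (hi : 0 ≤ i) (hj : 0 ≤ j) :
    get2 dp i j = ((dp[i.toNat]?.getD [])[j.toNat]?).getD 0 := by
  unfold get2
  rw [PySem.List.pyGetD_of_nonneg dp [] hi, PySem.List.pyGetD_of_nonneg _ 0 hj,
      List.getD_eq_getElem?_getD, List.getD_eq_getElem?_getD]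

lemma set2_eq (dp : List (List Int)) (i j : Int) (v : Int) (hi : 0 ≤ i) (hj : 0 ≤ j) :
    set2 dp i j v = dp.set i.toNat ((dp[i.toNat]?.getD []).set j.toNat v) := by
  unfold set2
  rw [PySem.List.pySetD_of_nonneg dp _ hi, PySem.List.pySetD_of_nonneg _ v hj,
      PySem.List.pyGetD_of_nonneg dp [] hi, List.getD_eq_getElem?_getD]

lemma set2_shape {n : Int} {dp : List (List Int)} (h : Shape n dp) (i j : Int) (v : Int)
    (hi : 0 ≤ i) (hi2 : i < n+2) (hj : 0 ≤ j) : Shape n (set2 dp i j v) := by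
  obtain ⟨h1, h2⟩ := h
  rw [set2_eq dp i j v hi hj]
  refine ⟨by simpa using h1, ?_⟩
  intro r hr
  rcases List.mem_or_eq_of_mem_set hr with hr' | rfl
  · exact h2 r hr'
  · rw [List.length_set]
    rcases Nat.lt_or_ge i.toNat dp.length with hl | hl
    · rw [List.getElem?_eq_getElem hl]
      exact h2 _ (List.getElem_mem hl)
    · exact absurd hl (by omega)

lemma get2_set2 {n : Int} {dp : List (List Int)} (h : Shape n dp)
    (i j i' j' : Int) (v : Int)
    (hi : 0 ≤ i) (hi2 : i < n+2) (hj : 0 ≤ j) (hj2 : j < n+2)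
    (hi' : 0 ≤ i') (hj' : 0 ≤ j') :
    get2 (set2 dp i j v) i' j' = if i' = i ∧ j' = j then v else get2 dp i' j' := by
  obtain ⟨h1, h2⟩ := h
  have hil : i.toNat < dp.length := by omega
  rw [set2_eq dp i j v hi hj, get2_eq _ i' j' hi' hj', get2_eq dp i' j' hi' hj']
  rw [List.getElem?_set]
  by_cases hii : i' = i
  · subst hii
    have hrl : (dp[i'.toNat]?.getD []).length = (n+2).toNat := by
      rw [List.getElem?_eq_getElem hil]
      exact h2 _ (List.getElem_mem hil)
    rw [if_pos (by omega), if_pos hil]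
    show (((dp[i'.toNat]?.getD []).set j.toNat v)[j'.toNat]?).getD 0 = _
    rw [List.getElem?_set]
    by_cases hjj : j' = j
    · subst hjj
      rw [if_pos (by omega), if_pos (by omega)]
      simp
    · rw [if_neg (by omega), if_neg (by simp [hjj])]
  · rw [if_neg (by omega), if_neg (by simp [hii])]

-- invariant: rows ≥ s of A's table hold g, everything else read under Pre_solve is 0
def Done (n : Int) (dp : List (List Int)) (s : Int) : Prop :=
  Shape n dp ∧
  ∀ i j : Int, 0 ≤ i → i < n+2 → 0 ≤ j → j ≤ n →
    get2 dp i j = if s ≤ i then g i j else 0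

-- body of A's inner (end) loop
def innerA (s : Int) (dp : List (List Int)) (e : Int) : List (List Int) :=
  if s = e then dp
  else
    let ans :=
      (PySem.List.pyRange s (e+1) 1).foldl (fun a k =>
        minO a (k + max (get2 dp s (k-1)) (get2 dp (k+1) e))) none
    set2 dp s e (ans.getD 0)

def stepA (n : Int) (dp : List (List Int)) (s : Int) : List (List Int) :=
  (PySem.List.pyRange s (n+1) 1).foldl (innerA s) dp

-- inner-row invariant for A while filling row s up to column e
def DoneRow (n : Int) (dp : List (List Int)) (s e : Int) : Prop :=
  Shape n dp ∧
  ∀ i j : Int, 0 ≤ i → i < n+2 → 0 ≤ j → j ≤ n →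
    get2 dp i j = if s+1 ≤ i ∨ (i = s ∧ j ≤ e) then g i j else 0

lemma rowA_inv (n : Int) (s : Int) (hs : 1 ≤ s) (hsn : s ≤ n) :
    ∀ (m : Nat) (e : Int) (dp : List (List Int)), e + m = n + 1 → s ≤ e →
    DoneRow n dp s (e-1) →
    DoneRow n ((PySem.List.pyRange e (n+1) 1).foldl (innerA s) dp) s n := by
  intro m
  induction m with
  | zero =>
    intro e dp he hse hinv
    have he' : e = n + 1 := by omega
    subst he'
    rw [PySem.List.pyRange_one_eq_nil (by omega)]
    have h1 : (n + 1 : Int) - 1 = n := by omega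
    rwa [h1] at hinv
  | succ m ih =>
    intro e dp he hse hinv
    rw [PySem.List.pyRange_one_cons (by omega), List.foldl_cons]
    obtain ⟨hsh, hv⟩ := hinv
    by_cases hes : s = e
    · have hA : innerA s dp e = dp := by unfold innerA; rw [if_pos hes]
      rw [hA]
      apply ih (e+1) dp (by omega) (by omega)
      refine ⟨hsh, fun i j hi hi2 hj hj2 => ?_⟩
      rw [hv i j hi hi2 hj hj2]
      by_cases hcase : s+1 ≤ i ∨ (i = s ∧ j ≤ e - 1)
      · rw [if_pos hcase, if_pos (by omega)]
      · by_cases hcase2 : s+1 ≤ i ∨ (i = s ∧ j ≤ e+1-1)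
        · rw [if_neg hcase, if_pos hcase2]
          rw [g_zero (by omega : j ≤ i)]
        · rw [if_neg hcase, if_neg hcase2]
    · have hse' : s < e := by omega
      -- the candidate reads are already correct
      have hreads : (PySem.List.pyRange s (e+1) 1).map
            (fun k => k + max (get2 dp s (k-1)) (get2 dp (k+1) e))
          = (PySem.List.pyRange s (e+1) 1).map
            (fun k => k + max (g s (k-1)) (g (k+1) e)) := by
        apply List.map_congr_left
        intro k hk
        rw [PySem.List.mem_pyRange_one] at hk
        have r1 : get2 dp s (k-1) = g s (k-1) := by
          rw [hv s (k-1) (by omega) (by omega) (by omega) (by omega), if_pos (by omega)]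
        have r2 : get2 dp (k+1) e = g (k+1) e := by
          rw [hv (k+1) e (by omega) (by omega) (by omega) (by omega), if_pos (by omega)]
        rw [r1, r2]
      have hans : ((PySem.List.pyRange s (e+1) 1).foldl (fun a k =>
            minO a (k + max (get2 dp s (k-1)) (get2 dp (k+1) e))) none).getD 0 = g s e := by
        rw [foldl_minO _ _ (by
          rw [PySem.List.pyRange_one_cons (show s < e+1 by omega)]
          exact List.cons_ne_nil _ _)]
        rw [hreads, g_rec hse']
      have hA : innerA s dp e = set2 dp s e (g s e) := by
        unfold innerA
        rw [if_neg hes]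
        show set2 dp s e _ = _
        rw [hans]
      rw [hA]
      apply ih (e+1) _ (by omega) (by omega)
      refine ⟨set2_shape ⟨hsh.1, hsh.2⟩ s e _ (by omega) (by omega) (by omega), fun i j hi hi2 hj hj2 => ?_⟩
      rw [get2_set2 hsh s e i j _ (by omega) (by omega) (by omega) (by omega) hi hj]
      by_cases hij : i = s ∧ j = e
      · rw [if_pos hij, if_pos (by omega)]
        rw [hij.1, hij.2]
      · rw [if_neg hij, hv i j hi hi2 hj hj2]
        by_cases hc : s+1 ≤ i ∨ (i = s ∧ j ≤ e - 1)
        · rw [if_pos hc, if_pos (by omega)]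
        · rw [if_neg hc, if_neg (by omega)]

lemma stepA_done (n : Int) (s : Int) (hs : 1 ≤ s) (hsn : s ≤ n)
    {dp : List (List Int)} (h : Done n dp (s+1)) : Done n (stepA n dp s) s := by
  obtain ⟨hsh, hv⟩ := h
  have h0 : DoneRow n dp s (s-1) := by
    refine ⟨hsh, fun i j hi hi2 hj hj2 => ?_⟩
    rw [hv i j hi hi2 hj hj2]
    by_cases hc : s + 1 ≤ i
    · rw [if_pos (Or.inl hc), if_pos hc]
    · by_cases hc2 : i = s ∧ j ≤ s - 1
      · rw [if_neg (by omega), if_pos (Or.inr hc2), g_zero (by omega)]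
      · rw [if_neg (by omega), if_neg (by omega)]
  have hrow := rowA_inv n s hs hsn (n + 1 - s).toNat s dp (by omega) le_rfl h0
  obtain ⟨hsh', hv'⟩ := hrow
  unfold stepA
  refine ⟨hsh', fun i j hi hi2 hj hj2 => ?_⟩
  rw [hv' i j hi hi2 hj hj2]
  by_cases hc : s ≤ i
  · rw [if_pos (by omega), if_pos hc]
  · rw [if_neg (by omega), if_neg hc]

lemma outerA_inv (n : Int) :
    ∀ (m : Nat) (dp : List (List Int)), (m : Int) ≤ n → Done n dp ((m : Int)+1) →
    Done n ((PySem.List.pyRange (m : Int) 0 (-1)).foldl (fun dp s => stepA n dp s) dp) 1 := by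
  intro m
  induction m with
  | zero =>
    intro dp _ h
    rw [PySem.List.pyRange_neg_one_eq_nil (by simp)]
    simpa using h
  | succ m ih =>
    intro dp hm h
    have hc : (((m+1 : Nat) : Int)) = (m : Int) + 1 := by push_cast; ring
    rw [hc] at hm h ⊢
    rw [PySem.List.pyRange_neg_one_cons (by omega), List.foldl_cons]
    have h1 : ((m : Int) + 1 - 1) = (m : Int) := by omega
    rw [h1]
    apply ih _ (by omega)
    exact stepA_done n _ (by omega) (by omega) h

-- initial table
lemma init_done (n : Int) (hn : 0 ≤ n) :
    Done n ((PySem.List.pyRange 0 (n+2) 1).map (fun _ =>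
      (PySem.List.pyRange 0 (n+2) 1).map (fun _ => (0 : Int)))) (n+1) := by
  have hlen : ((PySem.List.pyRange 0 (n+2) 1).map (fun _ =>
      (PySem.List.pyRange 0 (n+2) 1).map (fun _ => (0 : Int)))).length = (n+2).toNat := by
    simp [PySem.List.length_pyRange_one]
  refine ⟨⟨hlen, ?_⟩, ?_⟩
  · intro r hr
    rw [List.mem_map] at hr
    obtain ⟨_, _, rfl⟩ := hr
    simp [PySem.List.length_pyRange_one]
  · intro i j hi hi2 hj hj2
    have hil : i.toNat < ((PySem.List.pyRange 0 (n+2) 1).map (fun _ =>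
        (PySem.List.pyRange 0 (n+2) 1).map (fun _ => (0 : Int)))).length := by
      rw [hlen]; omega
    have hval : get2 ((PySem.List.pyRange 0 (n+2) 1).map (fun _ =>
        (PySem.List.pyRange 0 (n+2) 1).map (fun _ => (0 : Int)))) i j = 0 := by
      rw [get2_eq _ i j hi hj, List.getElem?_eq_getElem hil]
      simp only [List.getElem_map, Option.getD_some]
      rcases Nat.lt_or_ge j.toNat ((PySem.List.pyRange 0 (n+2) 1).map (fun _ => (0:Int))).length with hl | hl
      · rw [List.getElem?_eq_getElem hl]
        simp
      · rw [List.getElem?_eq_none hl]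
        rfl
    rw [hval]
    by_cases hc : n + 1 ≤ i
    · rw [if_pos hc, g_zero (by omega)]
    · rw [if_neg hc]

lemma solve_eq_g (n : Int) (hn : 0 ≤ n) : solve n = g 1 n := by
  have hsolve : solve n = get2 ((PySem.List.pyRange n 0 (-1)).foldl (fun dp s => stepA n dp s)
      ((PySem.List.pyRange 0 (n+2) 1).map (fun _ =>
        (PySem.List.pyRange 0 (n+2) 1).map (fun _ => (0 : Int))))) 1 n := rfl
  rw [hsolve]
  have hstart : Done n ((PySem.List.pyRange 0 (n+2) 1).map (fun _ =>
      (PySem.List.pyRange 0 (n+2) 1).map (fun _ => (0 : Int)))) ((n.toNat : Int) + 1) := by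
    have h1 : ((n.toNat : Int)) = n := by omega
    rw [h1]
    exact init_done n hn
  have hfin := outerA_inv n n.toNat _ (by omega) hstart
  have h1 : ((n.toNat : Int)) = n := by omega
  rw [h1] at hfin
  obtain ⟨⟨hl, _⟩, hv⟩ := hfin
  rw [hv 1 n (by omega) (by omega) (by omega) le_rfl, if_pos (by omega)]

-- ---------- side B ----------

-- invariant on B's memo: every stored key is a nontrivial interval holding its g-value
def InvB (m : Std.HashMap (Int × Int) Int) : Prop :=
  (∀ (p : Int × Int) (v : Int), m[p]? = some v → v = g p.1 p.2) ∧
  (∀ p : Int × Int, p ∈ m → p.1 < p.2)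

lemma fuelB_pos (L : Nat) : 1 ≤ fuelB L := by
  cases L with
  | zero => simp [fuelB]
  | succ L => simp [fuelB]; omega

lemma runB_nil (f : Nat) (m : Std.HashMap (Int × Int) Int) : runB f [] m = m := by
  cases f <;> rfl

lemma length_depsB (s e : Int) (h : s ≤ e) :
    (depsB s e).length = 2 * ((e - s).toNat + 1) := by
  simp [depsB, PySem.List.length_pyRange_one]
  omega

lemma mem_depsB_short {s e : Int} (hse : s < e) :
    ∀ p ∈ depsB s e, (p.2 - p.1).toNat < (e - s).toNat := by
  intro p hp
  rcases List.mem_append.mp hp with h | h <;>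
  · obtain ⟨k, hk, rfl⟩ := List.mem_map.mp h
    rw [PySem.List.mem_pyRange_one] at hk
    simp only
    omega

lemma getD_eq_g {m : Std.HashMap (Int × Int) Int} (hm : InvB m)
    (p : Int × Int) (hp : p.1 < p.2 → p ∈ m) : m.getD p 0 = g p.1 p.2 := by
  by_cases h : p.1 < p.2
  · obtain ⟨v, hv⟩ : ∃ v, m[p]? = some v := by
      have := hp h
      rw [← Std.HashMap.isSome_getElem?_iff_mem] at this
      exact Option.isSome_iff_exists.mp this
    rw [Std.HashMap.getD_eq_getD_getElem?, hv, Option.getD_some]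
    exact hm.1 p v hv
  · have hnm : ¬ p ∈ m := fun hmem => h (hm.2 p hmem)
    rw [Std.HashMap.getD_eq_getD_getElem?, Std.HashMap.getElem?_eq_none hnm]
    exact (g_zero (by omega)).symm

-- when every nontrivial dependency is memoized, B's candidate min is exactly g s e
lemma bestB_eq {m : Std.HashMap (Int × Int) Int} (hm : InvB m) {s e : Int} (hse : s < e)
    (hall : ∀ p ∈ depsB s e, p.1 < p.2 → p ∈ m) : bestB m s e = g s e := by
  unfold bestB
  rw [g_rec hse]
  congr 2
  apply List.map_congr_left
  intro k hk
  have hk' := hk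
  rw [PySem.List.mem_pyRange_one] at hk'
  have h1 : m.getD (s, k - 1) 0 = g s (k - 1) :=
    getD_eq_g hm (s, k - 1) (fun h => hall _ (List.mem_append.mpr (Or.inl
      (List.mem_map.mpr ⟨k, hk, rfl⟩))) h)
  have h2 : m.getD (k + 1, e) 0 = g (k + 1) e :=
    getD_eq_g hm (k + 1, e) (fun h => hall _ (List.mem_append.mpr (Or.inr
      (List.mem_map.mpr ⟨k, hk, rfl⟩))) h)
  rw [h1, h2]

lemma hall_of_pend_empty {m : Std.HashMap (Int × Int) Int} {s e : Int}
    (h : (pendB m s e).isEmpty = true) : ∀ p ∈ depsB s e, p.1 < p.2 → p ∈ m := by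
  intro p hp hlt
  rw [List.isEmpty_iff] at h
  have hfil := List.filter_eq_nil_iff.mp h p hp
  by_contra hnm
  have hcont : m.contains p = false := by
    rw [← Bool.not_eq_true, ← Std.HashMap.mem_iff_contains]
    exact hnm
  simp [hlt, hcont] at hfil

lemma pend_empty_of_hall {m : Std.HashMap (Int × Int) Int} {s e : Int}
    (h : ∀ p ∈ depsB s e, p.1 < p.2 → p ∈ m) : (pendB m s e).isEmpty = true := by
  rw [List.isEmpty_iff]
  unfold pendB
  rw [List.filter_eq_nil_iff]
  intro p hp
  by_cases hlt : p.1 < p.2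
  · have hcont : m.contains p = true := by
      rw [← Std.HashMap.mem_iff_contains]
      exact h p hp hlt
    simp [hcont]
  · simp [hlt]

lemma InvB_insert {m : Std.HashMap (Int × Int) Int} (hm : InvB m) {s e : Int}
    (hse : s < e) : InvB (m.insert (s, e) (g s e)) := by
  constructor
  · intro p v hv
    rw [Std.HashMap.getElem?_insert] at hv
    by_cases hp : (s, e) = p
    · rw [if_pos (by simp [hp])] at hv
      cases hv
      rw [← hp]
    · rw [if_neg (by simp [hp])] at hv
      exact hm.1 p v hv
  · intro p hp
    rcases (Std.HashMap.mem_insert).mp hp with h | h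
    · have hpe : (s, e) = p := by simpa using h
      rw [← hpe]
      exact hse
    · exact hm.2 p h

-- the main resolution lemma: popping (s,e) consumes at most fuelB L fuel, extends the
-- memo (keeping InvB) and memoizes (s,e) when it is nontrivial
lemma runB_aux (L0 : Nat)
    (res : ∀ (s e : Int) (st : List (Int × Int)) (m : Std.HashMap (Int × Int) Int) (f : Nat),
      (e - s).toNat ≤ L0 → InvB m → fuelB L0 ≤ f →
      ∃ m' f', runB f ((s, e) :: st) m = runB f' st m' ∧ InvB m' ∧
        (∀ p : Int × Int, p ∈ m → p ∈ m') ∧ (s < e → (s, e) ∈ m') ∧ f ≤ f' + fuelB L0) :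
    ∀ (ps : List (Int × Int)) (st : List (Int × Int)) (m : Std.HashMap (Int × Int) Int)
      (f : Nat), (∀ p ∈ ps, (p.2 - p.1).toNat ≤ L0) → InvB m →
      ps.length * fuelB L0 ≤ f →
      ∃ m' f', runB f (ps ++ st) m = runB f' st m' ∧ InvB m' ∧
        (∀ p : Int × Int, p ∈ m → p ∈ m') ∧ (∀ p ∈ ps, p.1 < p.2 → p ∈ m') ∧
        f ≤ f' + ps.length * fuelB L0 := by
  intro ps
  induction ps with
  | nil =>
    intro st m f _ hm _
    exact ⟨m, f, rfl, hm, fun p hp => hp, by simp, by simp⟩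
  | cons p ps ih =>
    intro st m f hlen hm hf
    obtain ⟨a, b⟩ := p
    have h1 : ((a, b) :: ps).length * fuelB L0 = ps.length * fuelB L0 + fuelB L0 := by
      simp [List.length_cons]
      ring
    have hflen : ps.length * fuelB L0 + fuelB L0 ≤ f := by omega
    obtain ⟨m1, f1, hrun1, hm1, hext1, hmem1, hf1⟩ :=
      res a b (ps ++ st) m f (hlen (a, b) (List.mem_cons_self ..)) hm (by omega)
    obtain ⟨m2, f2, hrun2, hm2, hext2, hmem2, hf2⟩ :=
      ih st m1 f1 (fun q hq => hlen q (List.mem_cons_of_mem _ hq)) hm1 (by omega)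
    refine ⟨m2, f2, ?_, hm2, fun q hq => hext2 q (hext1 q hq), ?_, by omega⟩
    · rw [List.cons_append, hrun1, hrun2]
    · intro q hq hlt
      rcases List.mem_cons.mp hq with rfl | hq'
      · exact hext2 _ (hmem1 hlt)
      · exact hmem2 q hq' hlt

lemma runB_resolve (L : Nat) :
    ∀ (s e : Int) (st : List (Int × Int)) (m : Std.HashMap (Int × Int) Int) (f : Nat),
      (e - s).toNat ≤ L → InvB m → fuelB L ≤ f →
      ∃ m' f', runB f ((s, e) :: st) m = runB f' st m' ∧ InvB m' ∧
        (∀ p : Int × Int, p ∈ m → p ∈ m') ∧ (s < e → (s, e) ∈ m') ∧ f ≤ f' + fuelB L := by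
  induction L using Nat.strong_induction_on with
  | _ L ih =>
  intro s e st m f hL hm hf
  have hpos := fuelB_pos L
  cases f with
  | zero => omega
  | succ f0 =>
  by_cases hc : e ≤ s ∨ (s, e) ∈ m
  · refine ⟨m, f0, ?_, hm, fun p hp => hp, ?_, by omega⟩
    · simp only [runB]; rw [if_pos hc]
    · intro hse
      rcases hc with h | h
      · omega
      · exact h
  · have hse : s < e := by
      rcases not_or.mp hc with ⟨h, _⟩; omega
    have hL1 : 1 ≤ (e - s).toNat := by omega
    cases L with
    | zero => omega
    | succ L0 =>
    have hdep : ∀ p ∈ depsB s e, (p.2 - p.1).toNat ≤ L0 := by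
      intro p hp
      have := mem_depsB_short hse p hp
      omega
    have hdlen : (depsB s e).length = 2 * ((e - s).toNat + 1) := length_depsB s e (by omega)
    by_cases hpe : (pendB m s e).isEmpty
    · -- all dependencies ready: memoize
      have hall := hall_of_pend_empty hpe
      refine ⟨m.insert (s, e) (g s e), f0, ?_, InvB_insert hm hse, ?_, ?_, ?_⟩
      · simp only [runB]
        rw [if_neg hc, if_pos hpe, bestB_eq hm hse hall]
      · intro p hp
        exact Std.HashMap.mem_insert.mpr (Or.inr hp)
      · intro _
        exact Std.HashMap.mem_insert.mpr (Or.inl (by simp))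
      · have : 1 ≤ fuelB (L0 + 1) := fuelB_pos _
        omega
    · -- push the missing dependencies, resolve them, then revisit (s,e)
      have hrun0 : runB (f0 + 1) ((s, e) :: st) m
          = runB f0 ((pendB m s e).reverse ++ (s, e) :: st) m := by
        simp only [runB]
        rw [if_neg hc, if_neg hpe]
      have hplen : (pendB m s e).reverse.length ≤ 2 * (L0 + 2) := by
        rw [List.length_reverse]
        have := List.length_filter_le (fun p => decide (p.1 < p.2) && !m.contains p) (depsB s e)
        unfold pendB
        omega
      have hmulb : (pendB m s e).reverse.length * fuelB L0 ≤ 2 * (L0 + 2) * fuelB L0 :=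
        Nat.mul_le_mul_right _ hplen
      have hfuelL : fuelB (L0 + 1) = 2 + 2 * (L0 + 2) * fuelB L0 := rfl
      obtain ⟨m1, f1, hrun1, hm1, hext1, hmem1, hf1⟩ :=
        runB_aux L0 (fun s' e' st' m' f' h1 h2 h3 =>
            ih L0 (Nat.lt_succ_self L0) s' e' st' m' f' h1 h2 h3)
          (pendB m s e).reverse ((s, e) :: st) m f0
          (fun p hp => hdep p (List.mem_reverse.mp (by
            have := List.mem_reverse.mp hp
            exact List.mem_reverse.mpr (List.mem_of_mem_filter this))))
          hm (by omega)
      have hpos0 := fuelB_pos L0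
      -- every nontrivial dependency is now memoized
      have hall1 : ∀ p ∈ depsB s e, p.1 < p.2 → p ∈ m1 := by
        intro p hp hlt
        by_cases hpm : p ∈ m
        · exact hext1 p hpm
        · apply hmem1 p _ hlt
          rw [List.mem_reverse]
          unfold pendB
          rw [List.mem_filter]
          refine ⟨hp, ?_⟩
          have hcont : m.contains p = false := by
            rw [← Bool.not_eq_true, ← Std.HashMap.mem_iff_contains]
            exact hpm
          simp [hlt, hcont]
      have hf1pos : 1 ≤ f1 := by omega
      cases f1 with
      | zero => omega
      | succ f2 =>
      by_cases hc2 : e ≤ s ∨ (s, e) ∈ m1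
      · -- already memoized by a duplicate copy
        have hmem : (s, e) ∈ m1 := by
          rcases hc2 with h | h
          · omega
          · exact h
        refine ⟨m1, f2, ?_, hm1, hext1, fun _ => hmem, by omega⟩
        rw [hrun0, hrun1]
        simp only [runB]
        rw [if_pos hc2]
      · have hpe2 : (pendB m1 s e).isEmpty = true := pend_empty_of_hall hall1
        refine ⟨m1.insert (s, e) (g s e), f2, ?_, InvB_insert hm1 hse, ?_, ?_, by omega⟩
        · rw [hrun0, hrun1]
          simp only [runB]
          rw [if_neg hc2, if_pos hpe2, bestB_eq hm1 hse hall1]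
        · intro p hp
          exact Std.HashMap.mem_insert.mpr (Or.inr (hext1 p hp))
        · intro _
          exact Std.HashMap.mem_insert.mpr (Or.inl (by simp))

lemma solve_alt_eq_g (n : Int) : solve_alt n = g 1 n := by
  unfold solve_alt
  have hInv : InvB (∅ : Std.HashMap (Int × Int) Int) := by
    constructor
    · intro p v hv; simp at hv
    · intro p hp; simp at hp
  obtain ⟨m', f', hrun, hm', _, hmem, _⟩ :=
    runB_resolve ((n - 1).toNat) 1 n [] ∅ (fuelB ((n - 1).toNat)) (by omega) hInv le_rfl
  rw [hrun, runB_nil]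
  by_cases h1 : (1 : Int) < n
  · exact getD_eq_g hm' (1, n) (fun _ => hmem h1)
  · have hnm : ¬ (1, n) ∈ m' := fun hmem' => by
      have := hm'.2 (1, n) hmem'
      simp at this
      omega
    rw [Std.HashMap.getD_eq_getD_getElem?, Std.HashMap.getElem?_eq_none hnm]
    exact (g_zero (by omega)).symm

-- ===== VERDICT (by name: the statement is the Claim_ definition above) =====
theorem solve_spec : Claim_equal_solve := by
  intro n _ hpre
  unfold Spec_solve
  rw [solve_eq_g n hpre, solve_alt_eq_g n]
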